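-- pv_equiv track=rewrite | github.com/QQQQQQBY/BotInfluence | UserBotAgentAttributes/interest_community.py | dispose_interest_community
-- ===== SOURCE A (Python) =====
-- def dispose_interest_community(community_dict, comm):
--     flag = 0
--     interest_community = []
--     for key, value in community_dict.items():
--         if value >= 8:
--             interest_community.append(key)
--             flag = 1
--     if flag == 0:
--         max_value = max(community_dict.values())
--         max_index = list(community_dict.values()).index(max_value)
--         if max_index != 0:
--             interest_community.append(list(community_dict.keys())[max_index])
--         elif max_index == 0:
--             interest_community.append(comm)
--     return interest_community
-- ===== SOURCE B (Python) =====
-- def dispose_interest_community(community_dict, comm):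
--     # Single pass: collect keys with value >= 8 while tracking the first maximum
--     # (value, key, index); fall back to it (or comm at index 0) if none qualified.
--     interest_community = []
--     best = None  # (value, key, index) of first maximum seen
--     for i, (key, value) in enumerate(community_dict.items()):
--         if value >= 8:
--             interest_community.append(key)
--         if best is None or value > best[0]:
--             best = (value, key, i)
--     if not interest_community:
--         if best is None:
--             raise ValueError("max() arg is an empty sequence")
--         _, best_key, best_index = best
--         interest_community.append(best_key if best_index != 0 else comm)
--     return interest_community
-- ===== Notes on version B (the rewrite author's own statement) =====
-- stated objective: alternative
-- what changed: B replaces A's four separate scans (filter loop, max(), list(values()).index(), keys lookup) by a single enumerate pass that collects qualifying keys while tracking the first maximum's (value, key, index), so the fallback needs no further scans.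
-- outside the precondition, e.g. on dispose_interest_community({}, 0): A raises ValueError, B raises ValueError
import Mathlib
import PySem

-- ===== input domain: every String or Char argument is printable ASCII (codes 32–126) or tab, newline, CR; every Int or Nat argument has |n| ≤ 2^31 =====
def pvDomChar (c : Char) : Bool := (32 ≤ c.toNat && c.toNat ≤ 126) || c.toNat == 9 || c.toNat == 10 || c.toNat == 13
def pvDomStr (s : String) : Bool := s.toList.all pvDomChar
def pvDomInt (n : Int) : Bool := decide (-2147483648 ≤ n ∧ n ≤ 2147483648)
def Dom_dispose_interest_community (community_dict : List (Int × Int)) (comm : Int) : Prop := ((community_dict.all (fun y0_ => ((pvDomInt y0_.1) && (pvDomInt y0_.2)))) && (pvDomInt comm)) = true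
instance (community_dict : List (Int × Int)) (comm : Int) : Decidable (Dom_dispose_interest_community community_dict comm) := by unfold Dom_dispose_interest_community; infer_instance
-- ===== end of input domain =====

-- B fuses A's three fallback scans (max, .index, keys lookup) into the single main
-- pass, tracking the first maximum's (value, key, index) on the fly (objective: alternative).

-- ===== PORT A =====
-- literal port of A: two-pass — collect keys with value >= 8, else scan for
-- max value, its first index, and the key at that index
def dispose_interest_community (community_dict : List (Int × Int)) (comm : Int) : List Int :=
  let st := community_dict.foldl
    (fun (st : Int × List Int) kv =>
      if 8 ≤ kv.2 then (1, st.2 ++ [kv.1]) else st) (0, [])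
  if st.1 = 0 then
    match PySem.List.max? (community_dict.map Prod.snd) (fun v => v) with
    | none => st.2  -- Python raises ValueError here (empty dict); excluded by Pre_
    | some max_value =>
      match PySem.List.index? (community_dict.map Prod.snd) max_value with
      | none => st.2  -- unreachable: max_value ∈ values
      | some max_index =>
        if max_index ≠ 0 then
          match PySem.List.pyGet? (community_dict.map Prod.fst) (max_index : Int) with
          | some k => st.2 ++ [k]
          | none => st.2  -- unreachable: max_index < length
        else st.2 ++ [comm]
  else st.2

-- ===== PORT B =====
-- literal port of B: one enumerate-fold carrying (result, best = first-max (value, key, index))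
def dispose_interest_community_alt (community_dict : List (Int × Int)) (comm : Int) : List Int :=
  let st := (PySem.List.enumerate community_dict 0).foldl
    (fun (st : List Int × Option (Int × Int × Int)) ikv =>
      let res := if 8 ≤ ikv.2.2 then st.1 ++ [ikv.2.1] else st.1
      let best := match st.2 with
        | none => some (ikv.2.2, ikv.2.1, ikv.1)
        | some b => if ikv.2.2 > b.1 then some (ikv.2.2, ikv.2.1, ikv.1) else some b
      (res, best)) ([], none)
  if st.1 = [] then
    match st.2 with
    | none => []  -- B raises ValueError here (empty dict); excluded by Pre_
    | some b => if b.2.2 ≠ 0 then st.1 ++ [b.2.1] else st.1 ++ [comm]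
  else st.1

-- ===== PRECONDITION & SPEC =====
-- Pre_ excludes only the empty dict, on which A's max() raises ValueError (B raises too).
def Pre_dispose_interest_community (community_dict : List (Int × Int)) (_comm : Int) : Prop :=
  community_dict ≠ []
instance (community_dict : List (Int × Int)) (comm : Int) : Decidable (Pre_dispose_interest_community community_dict comm) := by unfold Pre_dispose_interest_community; infer_instance

def pvWitness_dispose_interest_community : (List (Int × Int)) × Int := ([(1, 2), (3, 9)], 5)

def Spec_dispose_interest_community (community_dict : List (Int × Int)) (comm : Int) (out : List Int) : Prop := out = dispose_interest_community_alt community_dict comm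
instance (community_dict : List (Int × Int)) (comm : Int) (out : List Int) : Decidable (Spec_dispose_interest_community community_dict comm out) := by unfold Spec_dispose_interest_community; infer_instance

-- ===== CLAIM (what is proved, stated in full; the proofs are below) =====
def Claim_equal_dispose_interest_community : Prop := ∀ (community_dict : List (Int × Int)) (comm : Int), Dom_dispose_interest_community community_dict comm → Pre_dispose_interest_community community_dict comm → Spec_dispose_interest_community community_dict comm (dispose_interest_community community_dict comm)

-- ===== LEMMAS AND PROOFS =====

-- reference "first maximum" of an (key, value) list: (value, key, index of first occurrence)
def pvFmx : List (Int × Int) → Option (Int × Int × Nat)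
  | [] => none
  | kv :: t =>
    match pvFmx t with
    | none => some (kv.2, kv.1, 0)
    | some (v, k, i) => if kv.2 ≥ v then some (kv.2, kv.1, 0) else some (v, k, i + 1)

def pvFilt (l : List (Int × Int)) : List Int := (l.filter (fun kv => 8 ≤ kv.2)).map Prod.fst

def pvBupd (b0 : Option (Int × Int × Int)) (n : Int) (l : List (Int × Int)) : Option (Int × Int × Int) :=
  match b0, pvFmx l with
  | none, none => none
  | none, some (v, k, i) => some (v, k, n + (i : Int))
  | some b, none => some b
  | some b, some (v, k, i) => if v > b.1 then some (v, k, n + (i : Int)) else some b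

theorem pvFoldA (l : List (Int × Int)) : ∀ (f : Int) (r : List Int),
    l.foldl (fun (st : Int × List Int) kv =>
      if 8 ≤ kv.2 then (1, st.2 ++ [kv.1]) else st) (f, r)
    = ((if l.any (fun kv => 8 ≤ kv.2) then 1 else f), r ++ pvFilt l) := by
  induction l with
  | nil => intro f r; simp [pvFilt]
  | cons kv t ih =>
    intro f r
    by_cases h : 8 ≤ kv.2
    · simp [List.foldl_cons, h, ih, pvFilt]
    · simp only [List.foldl_cons, if_neg h]
      rw [ih]
      have hcond : ((kv :: t).any fun kv => decide (8 ≤ kv.2)) = (t.any fun kv => decide (8 ≤ kv.2)) := by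
        simp [h]
      have hf : pvFilt (kv :: t) = pvFilt t := by
        simp [pvFilt, h]
      rw [hcond, hf]

theorem pvFoldB (l : List (Int × Int)) : ∀ (n : Int) (r : List Int) (b0 : Option (Int × Int × Int)),
    (PySem.List.enumerate l n).foldl
      (fun (st : List Int × Option (Int × Int × Int)) ikv =>
        let res := if 8 ≤ ikv.2.2 then st.1 ++ [ikv.2.1] else st.1
        let best := match st.2 with
          | none => some (ikv.2.2, ikv.2.1, ikv.1)
          | some b => if ikv.2.2 > b.1 then some (ikv.2.2, ikv.2.1, ikv.1) else some b
        (res, best)) (r, b0)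
    = (r ++ pvFilt l, pvBupd b0 n l) := by
  induction l with
  | nil =>
    intro n r b0
    cases b0 <;> simp [PySem.List.enumerate_nil, pvFilt, pvBupd, pvFmx]
  | cons kv t ih =>
    intro n r b0
    rw [PySem.List.enumerate_cons, List.foldl_cons, ih]
    have hfilt : (if 8 ≤ kv.2 then r ++ [kv.1] else r) ++ pvFilt t = r ++ pvFilt (kv :: t) := by
      by_cases h : 8 ≤ kv.2 <;> simp [pvFilt, h]
    refine Prod.ext hfilt ?_
    simp only [pvBupd, pvFmx]
    rcases b0 with _ | ⟨bv, bk, bi⟩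
    · rcases hft : pvFmx t with _ | ⟨v, k, i⟩
      · simp
      · by_cases hge : kv.2 ≥ v
        · have : ¬ v > kv.2 := by omega
          simp [hge, this]
        · have : v > kv.2 := by omega
          simp [hge, this]
          ring
    · rcases hft : pvFmx t with _ | ⟨v, k, i⟩
      · by_cases hb : kv.2 > bv
        · simp [hb]
        · simp [hb]
      · by_cases hge : kv.2 ≥ v
        · by_cases hb : kv.2 > bv
          · have h1 : ¬ v > kv.2 := by omega
            simp [hge, hb, h1]
          · have h1 : ¬ v > bv := by omega
            simp [hge, hb, h1]
        · have hv : v > kv.2 := by omega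
          by_cases hb : kv.2 > bv
          · have h1 : v > kv.2 := hv
            have h2 : v > bv := by omega
            simp [hge, hb, h1, h2]
            ring
          · by_cases h2 : v > bv
            · simp [hge, hb, h2]
              ring
            · simp [hge, hb, h2]

theorem pvFmx_none_iff (l : List (Int × Int)) : pvFmx l = none ↔ l = [] := by
  cases l with
  | nil => simp [pvFmx]
  | cons kv t =>
    simp only [pvFmx]
    rcases h : pvFmx t with _ | ⟨v, k, i⟩
    · simp
    · simp
      split <;> simp

theorem pvFmx_foldl_max (l : List (Int × Int)) : ∀ v k i, pvFmx l = some (v, k, i) →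
    ∀ a : Int, (l.map Prod.snd).foldl max a = max a v := by
  induction l with
  | nil => intro v k i h; simp [pvFmx] at h
  | cons kv t ih =>
    intro v k i h a
    simp only [pvFmx] at h
    rcases hft : pvFmx t with _ | ⟨v', k', i'⟩
    · have ht : t = [] := (pvFmx_none_iff t).mp hft
      rw [hft] at h
      simp at h
      simp [ht, ← h.1]
    · rw [hft] at h
      by_cases hge : kv.2 ≥ v'
      · simp [hge] at h
        obtain ⟨hv, hk, hi⟩ := h
        simp only [List.map_cons, List.foldl_cons]
        rw [ih v' k' i' hft (max a kv.2), ← hv]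
        rcases le_total v' kv.2 with hle | hle
        · rw [max_eq_left (le_trans hle (le_max_right a kv.2))]
        · omega
      · simp [hge] at h
        obtain ⟨hv, hk, hi⟩ := h
        simp only [List.map_cons, List.foldl_cons]
        rw [ih v' k' i' hft (max a kv.2), ← hv, max_assoc]
        congr 1
        omega

theorem pvFmx_spec (l : List (Int × Int)) : ∀ v k i, pvFmx l = some (v, k, i) →
    PySem.List.index? (l.map Prod.snd) v = some i ∧ (l.map Prod.fst)[i]? = some k ∧
    ∀ kv ∈ l, kv.2 ≤ v := by
  induction l with
  | nil => intro v k i h; simp [pvFmx] at h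
  | cons kv t ih =>
    intro v k i h
    rcases hft : pvFmx t with _ | ⟨v', k', i'⟩
    · have ht : t = [] := (pvFmx_none_iff t).mp hft
      simp only [pvFmx, hft] at h
      have h' : kv.2 = v ∧ kv.1 = k ∧ 0 = i := by
        simpa only [Option.some.injEq, Prod.mk.injEq] using h
      obtain ⟨rfl, rfl, rfl⟩ := h'
      subst ht
      refine ⟨by rw [List.map_cons]; exact PySem.List.index?_cons_self kv.2 _, by simp, ?_⟩
      intro q hq
      rcases List.mem_cons.mp hq with hq | hq
      · rw [hq]
      · simp at hq
    · simp only [pvFmx, hft] at h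
      obtain ⟨h1, h2, h3⟩ := ih v' k' i' hft
      by_cases hge : kv.2 ≥ v'
      · have h' : kv.2 = v ∧ kv.1 = k ∧ 0 = i := by
          rw [if_pos hge] at h
          simpa only [Option.some.injEq, Prod.mk.injEq] using h
        obtain ⟨rfl, rfl, rfl⟩ := h'
        refine ⟨by rw [List.map_cons]; exact PySem.List.index?_cons_self kv.2 _, by simp, ?_⟩
        intro q hq
        rcases List.mem_cons.mp hq with hq | hq
        · rw [hq]
        · exact le_trans (h3 q hq) hge
      · have h' : v' = v ∧ k' = k ∧ i' + 1 = i := by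
          rw [if_neg hge] at h
          simpa only [Option.some.injEq, Prod.mk.injEq] using h
        obtain ⟨rfl, rfl, rfl⟩ := h'
        have hne : kv.2 ≠ v' := fun he => hge (le_of_eq he.symm)
        refine ⟨?_, by simpa using h2, ?_⟩
        · rw [List.map_cons, PySem.List.index?_cons_of_ne _ hne, h1]
          rfl
        · intro q hq
          rcases List.mem_cons.mp hq with hq | hq
          · rw [hq]; omega
          · exact h3 q hq

theorem pvFilt_eq_nil_iff (l : List (Int × Int)) :
    pvFilt l = [] ↔ ¬ l.any (fun kv => 8 ≤ kv.2) := by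
  simp [pvFilt, List.filter_eq_nil_iff, List.any_eq_true]

-- ===== VERDICT (by name: the statement is the Claim_ definition above) =====
theorem dispose_interest_community_spec : Claim_equal_dispose_interest_community := by
  intro l comm _ hpre
  unfold Spec_dispose_interest_community
  unfold dispose_interest_community dispose_interest_community_alt
  rw [pvFoldA, pvFoldB]
  simp only []
  by_cases hany : l.any (fun kv => 8 ≤ kv.2)
  · have hfn : ¬ (pvFilt l = []) := by
      rw [pvFilt_eq_nil_iff]; exact fun h => h hany
    simp [hany, hfn]
  · have hfn : pvFilt l = [] := (pvFilt_eq_nil_iff l).mpr hany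
    rcases hml : pvFmx l with _ | ⟨v, k, i⟩
    · exact absurd ((pvFmx_none_iff l).mp hml) hpre
    · obtain ⟨hidx, hkey, _⟩ := pvFmx_spec l v k i hml
      rcases l with _ | ⟨kv0, t⟩
      · exact absurd rfl hpre
      · have hmax : PySem.List.max? ((kv0 :: t).map Prod.snd) (fun y => y) = some v := by
          rw [List.map_cons, PySem.List.max?_id_cons]
          have hthis := pvFmx_foldl_max (kv0 :: t) v k i hml kv0.2
          simp only [List.map_cons, List.foldl_cons, max_self] at hthis
          rw [hthis]
          have hm : kv0.2 ≤ v := (pvFmx_spec _ v k i hml).2.2 kv0 (by simp)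
          simp [max_eq_right hm]
        have hb : pvBupd none 0 (kv0 :: t) = some (v, k, (i : Int)) := by
          simp [pvBupd, hml]
        by_cases hi : i = 0
        · subst hi
          simp only [hfn, List.nil_append, List.append_nil, if_neg hany, hmax, hidx, hb]
          simp
        · have hkey' : (kv0.1 :: List.map Prod.fst t)[i]? = some k := by
            simpa using hkey
          simp only [hfn, List.nil_append, List.append_nil, if_neg hany, hmax, hidx, hb]
          simp [hi, hkey']
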